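-- pv_equiv track=rewrite | github.com/miliar/Code_Jam_Webscraper | Solutions_python/Problem_200/3341.py | check
-- ===== SOURCE A (Python) =====
-- def check(xa):
-- 	j=0
-- 	fault=False
-- 	xa=list(xa)
-- 	for i in range(1,len(xa)):
-- 		if int(xa[j])>int(xa[i]):
-- 			fault=True
-- 			break
-- 		j+=1
-- 	if fault:
-- 		i=0
-- 		while(xa[i]!=xa[j]):
-- 			i+=1
-- 		if i==0 and xa[i]=='1':
-- 			return "9"*(len(xa)-1)
-- 		else:
-- 			xa[i]=str(int(xa[i])-1)
-- 			i+=1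
-- 			while(i<len(xa)):
-- 				xa[i]='9'
-- 				i+=1
-- 			return "".join(xa)
-- 	else:
-- 		return "".join(xa)
-- ===== SOURCE B (Python) =====
-- def check(xa):
--     # Single right-to-left pass: fold each digit onto the processed suffix;
--     # on a descent, decrement the digit and turn the whole suffix into 9s.
--     res = []
--     fired = False
--     for c in reversed(xa):
--         d = int(c)
--         if res and d > res[0]:
--             res = [d - 1] + [9] * len(res)
--             fired = True
--         else:
--             res = [d] + res
--     if not fired:
--         return xa
--     s = "".join(map(str, res))
--     if s[0] == '0' and xa[0] != '0':
--         return s[1:]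
--     return s
-- ===== Notes on version B (the rewrite author's own statement) =====
-- stated objective: simpler
-- what changed: Replaces A's three index loops (scan for the first descent, backtrack to the first occurrence of that digit, then overwrite the tail with 9s) by a single right-to-left fold over the digits that, on a descent, decrements the current digit and turns the already-processed suffix into 9s, with a final one-leading-zero strip.
-- outside the precondition, e.g. on check('21a'): A returns '199', B raises ValueError
import Mathlib
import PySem

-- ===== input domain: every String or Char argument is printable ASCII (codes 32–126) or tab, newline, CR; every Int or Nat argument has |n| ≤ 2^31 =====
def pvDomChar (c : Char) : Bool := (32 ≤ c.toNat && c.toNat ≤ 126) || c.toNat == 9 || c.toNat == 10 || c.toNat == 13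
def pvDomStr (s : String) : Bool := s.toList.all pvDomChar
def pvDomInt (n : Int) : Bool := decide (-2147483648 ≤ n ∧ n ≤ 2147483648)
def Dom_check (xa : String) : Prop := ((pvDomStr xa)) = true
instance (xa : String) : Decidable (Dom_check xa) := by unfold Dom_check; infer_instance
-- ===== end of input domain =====

-- B replaces A's three index loops by a single right-to-left fold over the digits (simpler, same O(n) cost).

-- ===== PORT A =====
-- int(c) for a single digit character c (exact on '0'..'9')
def pvDigit (c : Char) : Int := (c.toNat : Int) - 48
-- str(d) for a one-digit integer 0 ≤ d ≤ 9 (exact there)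
def pvDigitChar (d : Int) : Char := Char.ofNat (48 + d.toNat)

-- A's first loop: for i in range(1, len(xa)): if int(xa[j]) > int(xa[i]): fault = True; break; j += 1
-- (returns the final j when the break fires, none when the loop runs out without a fault)
def checkFind (L : List Char) (j i : Nat) : Option Nat :=
  if _h : i < L.length then
    if pvDigit (L.getD j ' ') > pvDigit (L.getD i ' ') then some j
    else checkFind L (j + 1) (i + 1)
  else none
termination_by L.length - i

-- A's second loop: i = 0; while xa[i] != xa[j]: i += 1  (the bound check only makes it total)
def checkBack (L : List Char) (c : Char) (i : Nat) : Nat :=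
  if _h : i < L.length then
    if L.getD i ' ' ≠ c then checkBack L c (i + 1) else i
  else i
termination_by L.length - i

-- A's third loop: while i < len(xa): xa[i] = '9'; i += 1  (sets every position ≥ i to '9')
def checkNines (L : List Char) (i : Nat) : List Char :=
  match L, i with
  | [], _ => []
  | _ :: t, 0 => '9' :: checkNines t 0
  | c :: t, k + 1 => c :: checkNines t k

def check (xa : String) : String :=
  let L := xa.toList
  match checkFind L 0 1 with
  | none => String.ofList L
  | some j =>
    let i := checkBack L (L.getD j ' ') 0
    if i = 0 ∧ L.getD i ' ' = '1' then String.ofList (List.replicate (L.length - 1) '9')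
    else String.ofList (checkNines (L.set i (pvDigitChar (pvDigit (L.getD i ' ') - 1))) (i + 1))

-- ===== PORT B =====
-- one step of Source B's loop body: fold the next digit d (scanning right to left) onto (res, fired)
def altStep (acc : List Int × Bool) (d : Int) : List Int × Bool :=
  match acc with
  | (h :: t, f) =>
    if d > h then ((d - 1) :: List.replicate (h :: t).length 9, true) else (d :: h :: t, f)
  | ([], f) => ([d], f)

def check_alt (xa : String) : String :=
  let st := (xa.toList.reverse.map pvDigit).foldl altStep ([], false)
  if st.2 = false then xa
  else
    let s := st.1.map pvDigitChar
    if s.getD 0 ' ' = '0' ∧ xa.toList.getD 0 ' ' ≠ '0' then String.ofList (s.drop 1)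
    else String.ofList s

-- ===== PRECONDITION & SPEC =====
-- Pre_ excludes strings containing a non-digit character: there A raises ValueError, or (when a
-- descent occurs among the digits before the first non-digit) returns a value that depends
-- accidentally on the position of the non-digit, while B raises ValueError.
def Pre_check (xa : String) : Prop := xa.toList.all (fun c => 48 ≤ c.toNat && c.toNat ≤ 57) = true
instance (xa : String) : Decidable (Pre_check xa) := by unfold Pre_check; infer_instance
def pvWitness_check : String := "132"
def Spec_check (xa : String) (out : String) : Prop := out = check_alt xa
instance (xa : String) (out : String) : Decidable (Spec_check xa out) := by unfold Spec_check; infer_instance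

-- ===== CLAIM (what is proved, stated in full; the proofs are below) =====
def Claim_equal_check : Prop := ∀ (xa : String), Dom_check xa → Pre_check xa → Spec_check xa (check xa)

-- ===== LEMMAS AND PROOFS =====

-- the comparison both programs apply to adjacent digits
def pvLe (a b : Char) : Prop := pvDigit a ≤ pvDigit b

theorem chain_pairwise (M : List Char) (h : List.IsChain pvLe M) : List.Pairwise pvLe M := by
  induction h with
  | nil => exact List.Pairwise.nil
  | singleton a => simp
  | @cons_cons a b l hr h ih =>
    refine List.pairwise_cons.mpr ⟨?_, ih⟩
    intro c hc
    unfold pvLe at *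
    rcases List.mem_cons.mp hc with rfl | hc
    · exact hr
    · exact le_trans hr ((List.pairwise_cons.mp ih).1 c hc)

theorem chain_getD (R : Char → Char → Prop) (M : List Char) (h : List.IsChain R M) :
    ∀ x, x + 1 < M.length → R (M.getD x ' ') (M.getD (x + 1) ' ') := by
  induction h with
  | nil => intro x hx; simp at hx
  | singleton a => intro x hx; simp at hx
  | @cons_cons a b l hr h ih =>
    intro x hx
    cases x with
    | zero => simpa using hr
    | succ n => simpa using ih n (by simpa using hx)

theorem checkFind_none (L : List Char)
    (hmono : ∀ x, x + 1 < L.length → pvDigit (L.getD x ' ') ≤ pvDigit (L.getD (x + 1) ' ')) :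
    ∀ j, checkFind L j (j + 1) = none := by
  intro j
  generalize hfuel : L.length - (j + 1) = fuel
  induction fuel generalizing j with
  | zero =>
    rw [checkFind]
    have : ¬ (j + 1 < L.length) := by omega
    simp [this]
  | succ n ih =>
    by_cases h1 : j + 1 < L.length
    · have h2 : ¬ (pvDigit (L.getD j ' ') > pvDigit (L.getD (j + 1) ' ')) := by
        have := hmono j h1; omega
      rw [checkFind, dif_pos h1, if_neg h2]
      exact ih (j + 1) (by omega)
    · rw [checkFind, dif_neg h1]

theorem checkFind_some (L : List Char) (t : Nat)
    (ht : t + 1 < L.length)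
    (hd : pvDigit (L.getD t ' ') > pvDigit (L.getD (t + 1) ' ')) :
    ∀ j, j ≤ t →
      (∀ x, j ≤ x → x < t → pvDigit (L.getD x ' ') ≤ pvDigit (L.getD (x + 1) ' ')) →
      checkFind L j (j + 1) = some t := by
  intro j hj hmono
  generalize hfuel : t - j = fuel
  induction fuel generalizing j with
  | zero =>
    have : j = t := by omega
    subst this
    rw [checkFind, dif_pos ht, if_pos hd]
  | succ n ih =>
    have h1 : j + 1 < L.length := by omega
    have h2 : ¬ (pvDigit (L.getD j ' ') > pvDigit (L.getD (j + 1) ' ')) := by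
      have := hmono j (le_refl j) (by omega); omega
    rw [checkFind, dif_pos h1, if_neg h2]
    exact ih (j + 1) (by omega) (fun x hx1 hx2 => hmono x (by omega) hx2) (by omega)

theorem checkBack_eq (L : List Char) (c : Char) (p : Nat) (hp : p < L.length)
    (hc : L.getD p ' ' = c) :
    ∀ i, i ≤ p → (∀ x, i ≤ x → x < p → L.getD x ' ' ≠ c) → checkBack L c i = p := by
  intro i hi hne
  generalize hfuel : p - i = fuel
  induction fuel generalizing i with
  | zero =>
    have : i = p := by omega
    subst this
    rw [checkBack, dif_pos hp, if_neg (by simpa [List.getD] using hc)]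
  | succ n ih =>
    have h1 : i < L.length := by omega
    have h2 : L.getD i ' ' ≠ c := hne i (le_refl i) (by omega)
    rw [checkBack, dif_pos h1, if_pos h2]
    exact ih (i + 1) (by omega) (fun x hx1 hx2 => hne x (by omega) hx2) (by omega)

theorem checkNines_zero (B : List Char) : checkNines B 0 = List.replicate B.length '9' := by
  induction B with
  | nil => rfl
  | cons a t ih => simp [checkNines, ih, List.replicate_succ]

theorem checkNines_append (A B : List Char) :
    checkNines (A ++ B) A.length = A ++ List.replicate B.length '9' := by
  induction A with
  | nil => simpa using checkNines_zero B
  | cons a t ih => simpa [checkNines] using ih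

theorem altFold_length (M : List Int) : ∀ acc f,
    ((M.foldl altStep (acc, f)).1).length = acc.length + M.length := by
  induction M with
  | nil => intro acc f; simp
  | cons m M ih =>
    intro acc f
    simp only [List.foldl_cons]
    cases acc with
    | nil =>
      have := ih [m] f
      simp only [altStep] at *
      simp at this ⊢
      omega
    | cons h t =>
      by_cases hd : m > h
      · have := ih ((m - 1) :: List.replicate (h :: t).length 9) true
        simp only [altStep, if_pos hd] at *
        simp at this ⊢
        omega
      · have := ih (m :: h :: t) f
        simp only [altStep, if_neg hd] at *
        simp at this ⊢
        omega

theorem altFold_start (X : List Int) (x : Int) (f : Bool) :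
    ∃ h r fr, ((x :: X).reverse).foldl altStep ([], f) = (h :: r, fr) ∧
      h ≤ x ∧ r.length = X.length := by
  rw [List.reverse_cons, List.foldl_append]
  have hlen : ((X.reverse.foldl altStep ([], f)).1).length = X.length := by
    simpa using altFold_length X.reverse [] f
  obtain ⟨acc, f0, heq⟩ : ∃ a b, X.reverse.foldl altStep ([], f) = (a, b) := ⟨_, _, rfl⟩
  rw [heq] at hlen ⊢
  simp only [List.foldl_cons, List.foldl_nil]
  cases acc with
  | nil => exact ⟨x, [], f0, by simp [altStep], le_refl x, by simpa using hlen⟩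
  | cons h0 t =>
    by_cases hgt : x > h0
    · refine ⟨x - 1, List.replicate (h0 :: t).length 9, true, by simp [altStep, hgt], by omega, ?_⟩
      simpa using hlen
    · exact ⟨x, h0 :: t, f0, by simp [altStep, hgt], le_refl x, by simpa using hlen⟩

theorem altFold_run (d : Int) : ∀ (k : Nat) (h : Int) (r : List Int) (f : Bool), 1 ≤ k → h < d →
    (List.replicate k d).foldl altStep (h :: r, f) =
      ((d - 1) :: List.replicate (r.length + k) 9, true) := by
  intro k
  induction k with
  | zero => omega
  | succ k ih =>
    intro h r f _ hlt
    rw [List.replicate_succ, List.foldl_cons]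
    have hstep : altStep (h :: r, f) d = ((d - 1) :: List.replicate (r.length + 1) 9, true) := by
      simp [altStep, hlt]
    rw [hstep]
    cases k with
    | zero => simp
    | succ k' =>
      rw [ih (d - 1) (List.replicate (r.length + 1) 9) true (by omega) (by omega)]
      simp
      omega

theorem altFold_sorted : ∀ (M : List Int) (h : Int) (r : List Int) (f : Bool),
    List.Pairwise (fun a b : Int => b ≤ a) M → (∀ m ∈ M, m ≤ h) →
    M.foldl altStep (h :: r, f) = (M.reverse ++ h :: r, f) := by
  intro M
  induction M with
  | nil => intro h r f _ _; simp
  | cons m M ih =>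
    intro h r f hp hle
    rw [List.foldl_cons]
    have hstep : altStep (h :: r, f) m = (m :: h :: r, f) := by
      have : ¬ (m > h) := by have := hle m (by simp); omega
      simp [altStep, this]
    rw [hstep, ih m (h :: r) f (List.pairwise_cons.mp hp).2 (fun b hb => (List.pairwise_cons.mp hp).1 b hb)]
    simp

theorem pvDigit_inj (x y : Char) (h : pvDigit x = pvDigit y) : x = y := by
  unfold pvDigit at h
  have h2 : x.toNat = y.toNat := by omega
  exact Char.ext (UInt32.toNat_inj.mp h2)

theorem pairwise_replicate_pvLe (d : Char) : ∀ n, List.Pairwise pvLe (List.replicate n d) := by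
  intro n
  induction n with
  | zero => simp
  | succ n ih =>
    rw [List.replicate_succ]
    refine List.pairwise_cons.mpr ⟨?_, ih⟩
    intro c hc
    rw [List.eq_of_mem_replicate hc]
    exact le_refl _

theorem exists_decomp (L : List Char) (h : ¬ List.IsChain pvLe L) :
    ∃ P k d s S, L = P ++ List.replicate k d ++ s :: S ∧ 1 ≤ k ∧
      List.Pairwise pvLe (P ++ List.replicate k d) ∧
      (∀ c ∈ P, pvDigit c < pvDigit d) ∧ pvDigit s < pvDigit d := by
  induction L with
  | nil => exact absurd List.IsChain.nil h
  | cons a rest ih =>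
    cases rest with
    | nil => exact absurd (List.IsChain.singleton a) h
    | cons b t =>
      by_cases hab : pvLe a b
      · have hrest : ¬ List.IsChain pvLe (b :: t) := by
          intro hc; exact h (List.isChain_cons_cons.mpr ⟨hab, hc⟩)
        obtain ⟨P, k, d, s, S, heq, hk, hpw, hP, hs⟩ := ih hrest
        cases P with
        | nil =>
          simp only [List.nil_append] at heq
          have hbd : b = d := by
            cases k with
            | zero => omega
            | succ k' => simpa [List.replicate_succ] using congrArg (fun l => l.headD ' ') heq
          by_cases had : pvDigit a = pvDigit d
          · have had' : a = d := pvDigit_inj a d had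
            refine ⟨[], k + 1, d, s, S, ?_, by omega, ?_, by simp, hs⟩
            · have ht : t = List.replicate (k - 1) d ++ s :: S := by
                cases k with
                | zero => omega
                | succ k' => simpa [List.replicate_succ] using congrArg List.tail heq
              simp only [List.nil_append, List.replicate_succ]
              rw [had', hbd, ht]
              cases k with
              | zero => omega
              | succ k' => simp [List.replicate_succ]
            · simpa using pairwise_replicate_pvLe d (k + 1)
          · have halt : pvDigit a < pvDigit d := by
              unfold pvLe at hab
              have : pvDigit b = pvDigit d := by rw [hbd]
              omega
            refine ⟨[a], k, d, s, S, ?_, hk, ?_, ?_, hs⟩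
            · simpa using congrArg (List.cons a) heq
            · refine List.pairwise_cons.mpr ⟨?_, by simpa using hpw⟩
              intro c hc
              rw [List.eq_of_mem_replicate hc]
              unfold pvLe; omega
            · intro c hc
              rw [List.mem_singleton.mp hc]
              exact halt
        | cons p P' =>
          have hbp : b = p := by simpa using congrArg (fun l => l.headD ' ') heq
          have ht : t = P' ++ List.replicate k d ++ s :: S := by
            simpa using congrArg List.tail heq
          refine ⟨a :: p :: P', k, d, s, S, by simp [hbp, ht], hk, ?_, ?_, hs⟩
          · refine List.pairwise_cons.mpr ⟨?_, hpw⟩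
            intro c hc
            have hap : pvLe a p := by rw [hbp] at hab; exact hab
            rcases List.mem_cons.mp hc with rfl | hc2
            · exact hap
            · rcases List.mem_append.mp hc2 with hc' | hc'
              · have := (List.pairwise_cons.mp hpw).1 c (List.mem_append.mpr (Or.inl hc'))
                unfold pvLe at *; omega
              · have hcd : pvDigit c = pvDigit d := by
                  rw [show c = d from List.eq_of_mem_replicate hc']
                have hpd : pvDigit p < pvDigit d := hP p (by simp)
                unfold pvLe at *; omega
          · intro c hc
            rcases List.mem_cons.mp hc with rfl | hc'
            · have hpd : pvDigit p < pvDigit d := hP p (by simp)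
              unfold pvLe at hab
              have : pvDigit b = pvDigit p := by rw [hbp]
              omega
            · exact hP c hc'
      · exact ⟨[], 1, a, b, t, by simp, le_refl 1, by simp, by simp, by unfold pvLe at hab; omega⟩

theorem getD_prefix (A B : List Char) (x : Nat) (hx : x < A.length) :
    (A ++ B).getD x ' ' = A.getD x ' ' := by
  simp [List.getD_eq_getElem?_getD, List.getElem?_append_left hx]

theorem getD_run (P : List Char) (k j : Nat) (d : Char) (R : List Char) (hj : j < k) :
    (P ++ (List.replicate k d ++ R)).getD (P.length + j) ' ' = d := by
  rw [List.getD_eq_getElem?_getD, List.getElem?_append_right (by omega)]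
  have h1 : P.length + j - P.length = j := by omega
  rw [h1, List.getElem?_append_left (by simpa using hj)]
  simp [hj]

theorem getD_at (A B : List Char) : (A ++ B).getD A.length ' ' = B.getD 0 ' ' := by
  simp [List.getD_eq_getElem?_getD, List.getElem?_append_right]

theorem pvRound (c : Char) (h1 : 48 ≤ c.toNat) (h2 : c.toNat ≤ 57) :
    pvDigitChar (pvDigit c) = c := by
  unfold pvDigitChar pvDigit
  have h : 48 + (((c.toNat : Int)) - 48).toNat = c.toNat := by omega
  rw [h]
  exact Char.ofNat_toNat c

theorem checkA_desc (xa : String) (P : List Char) (k : Nat) (d s : Char) (S : List Char)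
    (heq : xa.toList = P ++ List.replicate k d ++ s :: S) (hk : 1 ≤ k)
    (hpw : List.Pairwise pvLe (P ++ List.replicate k d))
    (hP : ∀ c ∈ P, pvDigit c < pvDigit d) (hs : pvDigit s < pvDigit d) :
    check xa = if P.length = 0 ∧ d = '1' then String.ofList (List.replicate (k + S.length) '9')
      else String.ofList (P ++ pvDigitChar (pvDigit d - 1) :: List.replicate (k + S.length) '9') := by
  have hassoc : xa.toList = P ++ (List.replicate k d ++ s :: S) := by
    rw [heq, List.append_assoc]
  have hMlen : (P ++ List.replicate k d).length = P.length + k := by simp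
  have hlen : xa.toList.length = P.length + k + (S.length + 1) := by
    rw [heq]; simp; omega
  -- getD facts
  have hgetM : ∀ x, x < P.length + k → xa.toList.getD x ' ' = (P ++ List.replicate k d).getD x ' ' := by
    intro x hx
    rw [heq]
    exact getD_prefix _ _ x (by simpa using hx)
  have hrun : ∀ j, j < k → xa.toList.getD (P.length + j) ' ' = d := by
    intro j hj
    rw [hassoc]
    exact getD_run P k j d (s :: S) hj
  have hLt : xa.toList.getD (P.length + k - 1) ' ' = d := by
    have h1 : P.length + k - 1 = P.length + (k - 1) := by omega
    rw [h1]; exact hrun (k - 1) (by omega)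
  have hLt1 : xa.toList.getD (P.length + k) ' ' = s := by
    have h1 : P.length + k = (P ++ List.replicate k d).length := by simp
    rw [heq, h1, getD_at]
    simp
  have hadj : ∀ x, x < P.length + k - 1 →
      pvDigit (xa.toList.getD x ' ') ≤ pvDigit (xa.toList.getD (x + 1) ' ') := by
    intro x hx
    rw [hgetM x (by omega), hgetM (x + 1) (by omega)]
    rw [List.getD_eq_getElem _ _ (by simp; omega), List.getD_eq_getElem _ _ (by simp; omega)]
    exact List.pairwise_iff_getElem.mp hpw x (x + 1) (by simp; omega) (by simp; omega) (by omega)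
  have hfind : checkFind xa.toList 0 1 = some (P.length + k - 1) := by
    have := checkFind_some xa.toList (P.length + k - 1)
      (by omega) (by rw [hLt, show P.length + k - 1 + 1 = P.length + k from by omega, hLt1]; omega)
      0 (by omega) (fun x _ hx => hadj x hx)
    simpa using this
  have hback : checkBack xa.toList d 0 = P.length := by
    refine checkBack_eq xa.toList d P.length (by omega) ?_ 0 (by omega) ?_
    · simpa using hrun 0 (by omega)
    · intro x _ hxp heqc
      have hmem : xa.toList.getD x ' ' ∈ P := by
        rw [heq, getD_prefix _ _ x (by simp; omega), getD_prefix _ _ x (by omega),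
          List.getD_eq_getElem _ _ (by omega)]
        exact List.getElem_mem _
      have := hP _ hmem
      rw [heqc] at this
      omega
  -- now unfold check
  simp only [check]
  rw [hfind]
  simp only [hLt, hback]
  by_cases hcase : P.length = 0 ∧ d = '1'
  · obtain ⟨hp0, hd1⟩ := hcase
    have hcond : P.length = 0 ∧ xa.toList.getD P.length ' ' = '1' := by
      refine ⟨hp0, ?_⟩
      rw [show P.length = P.length + 0 from by omega, hrun 0 (by omega), hd1]
    rw [if_pos hcond, if_pos ⟨hp0, hd1⟩, hlen]
    have harith : P.length + k + (S.length + 1) - 1 = k + S.length := by omega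
    rw [harith]
  · have hcond : ¬ (P.length = 0 ∧ xa.toList.getD P.length ' ' = '1') := by
      intro ⟨hp0, hgd⟩
      rw [show P.length = P.length + 0 from by omega, hrun 0 (by omega)] at hgd
      exact hcase ⟨hp0, hgd⟩
    rw [if_neg hcond, if_neg hcase]
    have hgd : xa.toList.getD P.length ' ' = d := by
      rw [show P.length = P.length + 0 from by omega]; exact hrun 0 (by omega)
    rw [hgd]
    have hset : xa.toList.set P.length (pvDigitChar (pvDigit d - 1)) =
        P ++ pvDigitChar (pvDigit d - 1) :: (List.replicate (k - 1) d ++ s :: S) := by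
      rw [hassoc, show List.replicate k d = d :: List.replicate (k - 1) d from by
        rw [← List.replicate_succ]; congr 1; omega]
      simp
    rw [hset]
    have hnines : checkNines (P ++ pvDigitChar (pvDigit d - 1) :: (List.replicate (k - 1) d ++ s :: S)) (P.length + 1) =
        (P ++ [pvDigitChar (pvDigit d - 1)]) ++ List.replicate (k - 1 + (S.length + 1)) '9' := by
      have h2 : P ++ pvDigitChar (pvDigit d - 1) :: (List.replicate (k - 1) d ++ s :: S) =
          (P ++ [pvDigitChar (pvDigit d - 1)]) ++ (List.replicate (k - 1) d ++ s :: S) := by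
        simp
      rw [h2, show P.length + 1 = (P ++ [pvDigitChar (pvDigit d - 1)]).length from by simp]
      rw [checkNines_append]
      congr 1
      simp
    rw [hnines]
    have harith : k - 1 + (S.length + 1) = k + S.length := by omega
    rw [harith]
    simp

theorem pvDigitChar_ne_zero (t : Int) (h1 : 1 ≤ t) (h2 : t ≤ 8) : pvDigitChar t ≠ '0' := by
  unfold pvDigitChar
  interval_cases t <;> decide

theorem checkB_desc (xa : String) (P : List Char) (k : Nat) (d s : Char) (S : List Char)
    (heq : xa.toList = P ++ List.replicate k d ++ s :: S) (hk : 1 ≤ k)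
    (hpw : List.Pairwise pvLe (P ++ List.replicate k d))
    (hP : ∀ c ∈ P, pvDigit c < pvDigit d) (hs : pvDigit s < pvDigit d)
    (hdig : ∀ c ∈ xa.toList, 48 ≤ c.toNat ∧ c.toNat ≤ 57) :
    check_alt xa = if P.length = 0 ∧ d = '1' then String.ofList (List.replicate (S.length + k) '9')
      else String.ofList (P ++ pvDigitChar (pvDigit d - 1) :: List.replicate (S.length + k) '9') := by
  have hdmem : d ∈ xa.toList := by
    rw [heq]
    refine List.mem_append.mpr (Or.inl (List.mem_append.mpr (Or.inr ?_)))
    exact List.mem_replicate.mpr ⟨by omega, rfl⟩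
  have hsmem : s ∈ xa.toList := by rw [heq]; simp
  have hd9 := hdig d hdmem
  have hs9 := hdig s hsmem
  have hsd0 : 0 ≤ pvDigit s := by unfold pvDigit; omega
  have hdrange : 1 ≤ pvDigit d ∧ pvDigit d ≤ 9 := by
    unfold pvDigit at *; omega
  -- the fold
  have hseq : xa.toList.reverse.map pvDigit =
      (pvDigit s :: S.map pvDigit).reverse ++ List.replicate k (pvDigit d) ++ (P.map pvDigit).reverse := by
    rw [heq]
    simp [List.reverse_append, List.map_reverse, List.append_assoc]
  obtain ⟨h, r, fr, hfold1, hle, hrlen⟩ := altFold_start (S.map pvDigit) (pvDigit s) false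
  have hpwP : List.Pairwise pvLe P := (List.pairwise_append.mp hpw).1
  have hpwrev : List.Pairwise (fun a b : Int => b ≤ a) ((P.map pvDigit).reverse) := by
    rw [List.pairwise_reverse, List.pairwise_map]
    exact hpwP
  have hlerev : ∀ m ∈ (P.map pvDigit).reverse, m ≤ pvDigit d - 1 := by
    intro m hm
    rw [List.mem_reverse, List.mem_map] at hm
    obtain ⟨c, hc, rfl⟩ := hm
    have := hP c hc
    omega
  have hst : (xa.toList.reverse.map pvDigit).foldl altStep ([], false) =
      (P.map pvDigit ++ (pvDigit d - 1) :: List.replicate (S.length + k) 9, true) := by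
    rw [hseq, List.foldl_append, List.foldl_append, hfold1,
      altFold_run (pvDigit d) k h r fr hk (by omega),
      altFold_sorted ((P.map pvDigit).reverse) (pvDigit d - 1) _ true hpwrev hlerev]
    rw [List.reverse_reverse, hrlen]
    simp [List.length_map]
  -- the joined char list
  have hmempre : ∀ c ∈ P, c ∈ xa.toList := by
    intro c hc; rw [heq]; simp [hc]
  have hsmap : (P.map pvDigit ++ (pvDigit d - 1) :: List.replicate (S.length + k) 9).map pvDigitChar
      = P ++ pvDigitChar (pvDigit d - 1) :: List.replicate (S.length + k) '9' := by
    rw [List.map_append, List.map_map]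
    have h1 : P.map (pvDigitChar ∘ pvDigit) = P := by
      have h2 := List.map_congr_left (l := P) (f := pvDigitChar ∘ pvDigit) (g := id)
        (fun c hc => pvRound c (hdig c (hmempre c hc)).1 (hdig c (hmempre c hc)).2)
      simpa using h2
    rw [h1]
    simp only [List.map_cons, List.map_replicate]
    congr 2
  simp only [check_alt]
  rw [hst]
  simp only [Bool.true_eq_false, if_false, hsmap]
  cases P with
  | nil =>
    have hget0 : xa.toList.getD 0 ' ' = d := by
      rw [heq]
      simpa using getD_run [] k 0 d (s :: S) (by omega)
    by_cases hd1 : pvDigit d = 1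
    · have hdchar : d = '1' := pvDigit_inj d '1' (by rw [hd1]; decide)
      have hc0 : pvDigitChar (pvDigit d - 1) = '0' := by rw [hd1]; decide
      rw [hc0]
      rw [if_pos ⟨by simp [List.getD], by rw [hget0, hdchar]; decide⟩,
        if_pos ⟨rfl, hdchar⟩]
      simp
    · have hc0 : pvDigitChar (pvDigit d - 1) ≠ '0' :=
        pvDigitChar_ne_zero _ (by omega) (by omega)
      rw [if_neg (by intro hcc; exact hc0 (by simpa [List.getD] using hcc.1)),
        if_neg (by intro hcc; rw [hcc.2] at hd1; exact hd1 (by decide))]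
  | cons P0 P' =>
    have hget0 : xa.toList.getD 0 ' ' = P0 := by
      rw [heq]
      simp [List.getD]
    have hcond : ¬ (((P0 :: P') ++ pvDigitChar (pvDigit d - 1) :: List.replicate (S.length + k) '9').getD 0 ' ' = '0'
        ∧ xa.toList.getD 0 ' ' ≠ '0') := by
      intro hcc
      rw [hget0] at hcc
      exact hcc.2 (by simpa [List.getD] using hcc.1)
    rw [if_neg hcond, if_neg (by simp)]

theorem check_eq (xa : String) (hpre : ∀ c ∈ xa.toList, 48 ≤ c.toNat ∧ c.toNat ≤ 57) :
    check xa = check_alt xa := by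
  by_cases hc : List.IsChain pvLe xa.toList
  · have hA : check xa = xa := by
      simp only [check, checkFind_none xa.toList (chain_getD pvLe xa.toList hc) 0]
      exact String.ofList_toList
    have hrw : xa.toList.reverse.map pvDigit = (xa.toList.map pvDigit).reverse := by
      rw [List.map_reverse]
    have hsnd : ((xa.toList.reverse.map pvDigit).foldl altStep ([], false)).2 = false := by
      have hpwv : List.Pairwise (fun a b : Int => b ≤ a) ((xa.toList.map pvDigit).reverse) := by
        rw [List.pairwise_reverse, List.pairwise_map]
        exact chain_pairwise xa.toList hc
      rw [hrw]
      cases hW : (xa.toList.map pvDigit).reverse with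
      | nil => simp
      | cons w Wt =>
        rw [hW] at hpwv
        rw [List.foldl_cons, show altStep ([], false) w = ([w], false) from by simp [altStep],
          altFold_sorted Wt w [] false (List.pairwise_cons.mp hpwv).2
            (fun m hm => (List.pairwise_cons.mp hpwv).1 m hm)]
    have hB : check_alt xa = xa := by
      simp only [check_alt, hsnd]
      simp
    rw [hA, hB]
  · obtain ⟨P, k, d, s, S, heq, hk, hpw, hP, hs⟩ := exists_decomp xa.toList hc
    rw [checkA_desc xa P k d s S heq hk hpw hP hs,
      checkB_desc xa P k d s S heq hk hpw hP hs hpre,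
      show k + S.length = S.length + k from Nat.add_comm _ _]

-- ===== VERDICT (by name: the statement is the Claim_ definition above) =====
theorem check_spec : Claim_equal_check := by
  intro xa _ hpre
  unfold Spec_check
  refine check_eq xa ?_
  intro c hc
  have := List.all_eq_true.mp hpre c hc
  simp only [Bool.and_eq_true, decide_eq_true_eq] at this
  exact this
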